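-- pv_equiv track=rewrite | github.com/HaifaCLG/Triggering | Code/corpus_details.py | join_same
-- ===== SOURCE A (Python) =====
-- def join_same(langs: list[str], label: str, second_label=''):
--     new_list = list()
--     for i in range(len(langs)):
--         if i and langs[i] in {label, second_label} and langs[i - 1] in {label, second_label}:
--             continue
--         else:
--             new_list.append(langs[i])
--     return new_list
-- ===== SOURCE B (Python) =====
-- def join_same(langs: list[str], label: str, second_label=''):
--     special = {label, second_label}
--     out = []
--     i, n = 0, len(langs)
--     while i < n:
--         x = langs[i]
--         out.append(x)
--         i += 1
--         if x in special:
--             # skip the remainder of this maximal special run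
--             while i < n and langs[i] in special:
--                 i += 1
--     return out
-- ===== Notes on version B (the rewrite author's own statement) =====
-- stated objective: alternative
-- what changed: Replaces the index loop that rebuilds the {label, second_label} set and re-tests both langs[i] and langs[i-1] at every position by a run-based scan that builds the set once, emits each element, and on a special element skips the rest of its maximal special run.
import Mathlib
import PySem

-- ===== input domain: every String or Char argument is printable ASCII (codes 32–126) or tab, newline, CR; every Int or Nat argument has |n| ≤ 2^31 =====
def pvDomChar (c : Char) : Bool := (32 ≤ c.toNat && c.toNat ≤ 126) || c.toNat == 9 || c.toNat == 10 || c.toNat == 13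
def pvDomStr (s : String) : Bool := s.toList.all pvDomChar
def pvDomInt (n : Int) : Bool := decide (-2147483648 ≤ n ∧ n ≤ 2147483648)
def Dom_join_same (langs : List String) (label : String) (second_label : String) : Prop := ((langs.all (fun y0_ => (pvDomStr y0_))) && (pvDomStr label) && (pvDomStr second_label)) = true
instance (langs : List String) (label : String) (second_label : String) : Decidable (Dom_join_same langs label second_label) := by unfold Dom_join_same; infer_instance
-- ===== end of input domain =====

-- B replaces A's index loop with predecessor lookahead by a run-based scan (emit head of each
-- maximal special run, keep non-special elements); alternative decomposition, same O(n) cost.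


-- ===== PORT A =====
-- literal port of A: for i in range(len(langs)) with the continue-branch; langs[i] is always in
-- range, so the in-range access is ported as getD (exact here)
def join_same (langs : List String) (label : String) (second_label : String) : List String :=
  (List.range langs.length).foldl
    (fun new_list i =>
      if i != 0 && (langs.getD i "" == label || langs.getD i "" == second_label)
              && (langs.getD (i - 1) "" == label || langs.getD (i - 1) "" == second_label)
      then new_list
      else new_list ++ [langs.getD i ""]) []

-- ===== PORT B =====
-- membership test `x in special`
def pvSpecialB (label second_label x : String) : Bool := x == label || x == second_label

-- inner while loop of B: advance i past the special elements (returns the new i)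
def pvSkipRun (sp : String → Bool) (langs : List String) (i : Nat) : Nat :=
  if h : i < langs.length ∧ sp (langs.getD i "") then pvSkipRun sp langs (i + 1) else i
termination_by langs.length - i
decreasing_by omega

theorem pvSkipRun_ge (sp : String → Bool) (langs : List String) (i : Nat) :
    i ≤ pvSkipRun sp langs i := by
  induction hn : langs.length - i using Nat.strong_induction_on generalizing i with
  | _ n ih =>
    rw [pvSkipRun]
    split
    · next h => exact le_trans (Nat.le_succ i) (ih (langs.length - (i + 1)) (by omega) _ rfl)
    · exact le_refl i

-- outer while loop of B: emit langs[i], then (if special) skip the rest of its run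
def pvAltGoIdx (sp : String → Bool) (langs : List String) (i : Nat) : List String :=
  if h : i < langs.length then
    let x := langs.getD i ""
    x :: pvAltGoIdx sp langs (if sp x then pvSkipRun sp langs (i + 1) else i + 1)
  else []
termination_by langs.length - i
decreasing_by
  have := pvSkipRun_ge sp langs (i + 1)
  split <;> omega

def join_same_alt (langs : List String) (label : String) (second_label : String) : List String :=
  pvAltGoIdx (pvSpecialB label second_label) langs 0

-- ===== PRECONDITION & SPEC =====
def Spec_join_same (langs : List String) (label : String) (second_label : String) (out : List String) : Prop := out = join_same_alt langs label second_label
instance (langs : List String) (label : String) (second_label : String) (out : List String) : Decidable (Spec_join_same langs label second_label out) := by unfold Spec_join_same; infer_instance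

-- ===== CLAIM (what is proved, stated in full; the proofs are below) =====
def Claim_equal_join_same : Prop := ∀ (langs : List String) (label : String) (second_label : String), Dom_join_same langs label second_label → Spec_join_same langs label second_label (join_same langs label second_label)

-- ===== LEMMAS AND PROOFS =====

-- proof-side list-level versions of B's two while loops
def pvDropSp (sp : String → Bool) : List String → List String
  | [] => []
  | x :: xs => if sp x then pvDropSp sp xs else x :: xs

theorem pvDropSp_length_le (sp : String → Bool) (l : List String) :
    (pvDropSp sp l).length ≤ l.length := by
  induction l with
  | nil => simp [pvDropSp]
  | cons x xs ih =>
    simp only [pvDropSp]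
    split
    · exact le_trans ih (Nat.le_succ _)
    · simp

def pvAltGo (sp : String → Bool) : List String → List String
  | [] => []
  | x :: xs => x :: pvAltGo sp (if sp x then pvDropSp sp xs else xs)
termination_by l => l.length
decreasing_by
  split
  · exact Nat.lt_succ_of_le (pvDropSp_length_le _ _)
  · exact Nat.lt_succ_self _

-- the index loops compute the list-level loops on the dropped suffix
theorem pvSkipRun_drop (sp : String → Bool) (langs : List String) (i : Nat) :
    langs.drop (pvSkipRun sp langs i) = pvDropSp sp (langs.drop i) := by
  induction hn : langs.length - i using Nat.strong_induction_on generalizing i with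
  | _ n ih =>
    rw [pvSkipRun]
    split
    · next h =>
      obtain ⟨hlt, hsp⟩ := h
      have hdrop : langs.drop i = langs[i] :: langs.drop (i + 1) :=
        (List.getElem_cons_drop hlt).symm
      have hget : langs.getD i "" = langs[i] := by
        simp [List.getD, List.getElem?_eq_getElem hlt]
      rw [ih (langs.length - (i + 1)) (by omega) _ rfl, hdrop]
      simp only [pvDropSp]
      rw [if_pos (by rwa [hget] at hsp)]
    · next h =>
      by_cases hlt : i < langs.length
      · have hdrop : langs.drop i = langs[i] :: langs.drop (i + 1) :=
          (List.getElem_cons_drop hlt).symm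
        have hsp : sp (langs.getD i "") = false := by
          rcases Bool.eq_false_or_eq_true (sp (langs.getD i "")) with h' | h'
          · exact absurd ⟨hlt, h'⟩ h
          · exact h' 
        have hget : langs.getD i "" = langs[i] := by
          simp [List.getD, List.getElem?_eq_getElem hlt]
        rw [hdrop]
        simp only [pvDropSp]
        rw [if_neg (by rw [← hget, hsp]; simp), ← hdrop]
      · rw [List.drop_eq_nil_of_le (by omega)]
        simp [pvDropSp]

theorem pvAltGoIdx_drop (sp : String → Bool) (langs : List String) (i : Nat) :
    pvAltGoIdx sp langs i = pvAltGo sp (langs.drop i) := by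
  induction hn : langs.length - i using Nat.strong_induction_on generalizing i with
  | _ n ih =>
    rw [pvAltGoIdx]
    split
    · next hlt =>
      have hdrop : langs.drop i = langs[i] :: langs.drop (i + 1) :=
        (List.getElem_cons_drop hlt).symm
      have hget : langs.getD i "" = langs[i] := by
        simp [List.getD, List.getElem?_eq_getElem hlt]
      rw [hdrop]
      simp only [pvAltGo, hget]
      congr 1
      rcases Bool.eq_false_or_eq_true (sp langs[i]) with h1 | h1
      · rw [if_pos h1, if_pos h1]
        have hge := pvSkipRun_ge sp langs (i + 1)
        rw [ih (langs.length - pvSkipRun sp langs (i + 1)) (by omega) _ rfl,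
            pvSkipRun_drop]
      · rw [if_neg (by simp [h1]), if_neg (by simp [h1]),
            ih (langs.length - (i + 1)) (by omega) _ rfl]
    · next hge =>
      rw [List.drop_eq_nil_of_le (by omega)]
      simp [pvAltGo]


-- common reference function: prev = whether the previous element was special (false at the start)
def pvF (sp : String → Bool) : Bool → List String → List String
  | _, [] => []
  | prev, x :: xs => if prev && sp x then pvF sp (sp x) xs else x :: pvF sp (sp x) xs

-- A's fold over range(n) computes pvF, with prev read off from the previous index
theorem pvA_aux (sp : String → Bool) (langs : List String) :
    ∀ (i : Nat) (acc : List String), i ≤ langs.length →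
      (List.range' i (langs.length - i)).foldl
        (fun new_list j =>
          if j != 0 && sp (langs.getD j "") && sp (langs.getD (j - 1) "")
          then new_list else new_list ++ [langs.getD j ""]) acc
      = acc ++ pvF sp (i != 0 && sp (langs.getD (i - 1) "")) (langs.drop i) := by
  intro i acc hi
  induction hn : langs.length - i generalizing i acc with
  | zero =>
    have : i = langs.length := by omega
    subst this
    simp [pvF, List.drop_length]
  | succ k ih =>
    have hlt : i < langs.length := by omega
    have hdrop : langs.drop i = langs[i] :: langs.drop (i + 1) :=
      (List.getElem_cons_drop hlt).symm
    have hget' : langs[i]?.getD "" = langs[i] := by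
      simp [List.getElem?_eq_getElem hlt]
    rw [List.range'_succ, List.foldl_cons,
        ih (i + 1) _ (by omega) (by omega), hdrop]
    simp only [pvF, List.getD, hget', Nat.add_sub_cancel]
    rcases Bool.eq_false_or_eq_true (i != 0) with h0 | h0 <;>
      rcases Bool.eq_false_or_eq_true (sp langs[i]) with h1 | h1 <;>
      rcases Bool.eq_false_or_eq_true (sp (langs[i - 1]?.getD "")) with h2 | h2 <;>
      simp [h0, h1, h2, List.getD, hget', List.append_assoc]

theorem pvA_eq_pvF (sp : String → Bool) (langs : List String) :
    (List.range langs.length).foldl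
        (fun new_list j =>
          if j != 0 && sp (langs.getD j "") && sp (langs.getD (j - 1) "")
          then new_list else new_list ++ [langs.getD j ""]) []
      = pvF sp false langs := by
  have := pvA_aux sp langs 0 [] (Nat.zero_le _)
  simpa [List.range_eq_range'] using this

-- B computes pvF as well: skipping the run = pvF with prev = true
theorem pvB_eq_pvF (sp : String → Bool) (l : List String) :
    pvAltGo sp l = pvF sp false l ∧ pvAltGo sp (pvDropSp sp l) = pvF sp true l := by
  induction l with
  | nil => simp [pvAltGo, pvDropSp, pvF]
  | cons x xs ih =>
    cases h : sp x with
    | false =>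
      refine ⟨?_, ?_⟩
      · simp [pvAltGo, pvF, h, ih.1]
      · simp [pvDropSp, pvAltGo, pvF, h, ih.1]
    | true =>
      refine ⟨?_, ?_⟩
      · simp [pvAltGo, pvF, h, ih.2]
      · simpa [pvDropSp, pvF, h] using ih.2

-- ===== VERDICT (by name: the statement is the Claim_ definition above) =====
theorem join_same_spec : Claim_equal_join_same := by
  intro langs label second_label _
  unfold Spec_join_same join_same join_same_alt pvSpecialB
  rw [pvAltGoIdx_drop]
  simp only [List.drop_zero]
  exact (pvA_eq_pvF (fun x => x == label || x == second_label) langs).trans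
    ((pvB_eq_pvF (fun x => x == label || x == second_label) langs).1).symm
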